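-- pv_equiv track=rewrite | github.com/ravi2228/Recipe-Generation | ing_verb_ordering/naive_bayes.py | get_corpus_counts
-- ===== SOURCE A (Python) =====
-- from collections import defaultdict
--
-- def get_corpus_counts(x,y,label):
--     """
--     Compute corpus counts of words for all documents with a given label.
--
--     :param x: list of counts, one per instance
--     :param y: list of labels, one per instance
--     :param label: desired label for corpus counts
--     :returns: defaultdict of corpus counts
--     :rtype: defaultdict
--
--     """
--     d = defaultdict(float)
--     for i, y_label in enumerate(y):
--         if y_label == label:
--             for word in x[i].keys():
--                 if word in d.keys():
--                     d[word] += x[i][word]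
--                 else:
--                     d[word] = x[i][word]
--         else:
--             for word in x[i].keys():
--                 if word not in d.keys():
--                     d[word] = 0
--     return d
-- ===== SOURCE B (Python) =====
-- def get_corpus_counts(x, y, label):
--     n = len(y)
--     # pass 1: vocabulary = every word of every considered document, first-appearance order
--     vocab = dict.fromkeys(w for i in range(n) for w in x[i])
--     # pass 2: accumulate counts over the matching documents only
--     sums = {}
--     for i in range(n):
--         if y[i] == label:
--             for w in x[i]:
--                 sums[w] = sums.get(w, 0) + x[i][w]
--     # words seen only in non-matching documents get 0
--     return {w: sums.get(w, 0) for w in vocab}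
-- ===== Notes on version B (the rewrite author's own statement) =====
-- stated objective: alternative
-- what changed: Replaces A's single interleaved pass (which both sums matching-label counts and zero-seeds words from non-matching documents in one stateful dict loop) by two independent passes — a vocabulary pass over all documents and a summing pass over matching documents only — combined at the end by mapping the vocabulary through the sums with default 0.
import Mathlib
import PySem

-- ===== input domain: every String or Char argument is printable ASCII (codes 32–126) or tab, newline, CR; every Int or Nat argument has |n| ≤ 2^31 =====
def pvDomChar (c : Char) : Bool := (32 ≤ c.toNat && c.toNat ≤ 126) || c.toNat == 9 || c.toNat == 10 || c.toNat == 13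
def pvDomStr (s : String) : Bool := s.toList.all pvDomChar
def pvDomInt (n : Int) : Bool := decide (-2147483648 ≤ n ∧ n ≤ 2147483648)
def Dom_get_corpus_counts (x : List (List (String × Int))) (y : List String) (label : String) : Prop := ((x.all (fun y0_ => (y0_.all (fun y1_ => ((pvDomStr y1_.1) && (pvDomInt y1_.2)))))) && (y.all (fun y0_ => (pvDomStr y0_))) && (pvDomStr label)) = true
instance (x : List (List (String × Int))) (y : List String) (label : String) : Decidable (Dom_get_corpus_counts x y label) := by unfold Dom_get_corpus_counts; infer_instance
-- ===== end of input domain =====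

-- B re-implements the count aggregation as two independent passes (vocabulary, then sums over
-- matching docs) instead of A's single interleaved stateful pass; same cost, clearer structure.

-- ===== PORT A =====
def get_corpus_counts (x : List (List (String × Int))) (y : List String) (label : String) : List (String × Int) :=
  ((PySem.List.enumerate y).foldl
    (fun d p =>
      let xi : PySem.Dict String Int := PySem.Dict.mk (PySem.List.pyGetD x p.1 [])
      if p.2 == label then
        xi.keys.foldl
          (fun d word =>
            if d.contains word then d.insert word (d.getD word 0 + xi.getD word 0)
            else d.insert word (xi.getD word 0)) d
      else
        xi.keys.foldl
          (fun d word => if !(d.contains word) then d.insert word 0 else d) d)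
    PySem.Dict.empty).items

-- ===== PORT B =====
def get_corpus_counts_alt (x : List (List (String × Int))) (y : List String) (label : String) : List (String × Int) :=
  let n : Int := PySem.List.len y
  let vocab : List String :=
    PySem.List.dedup
      ((PySem.List.pyRange 0 n 1).flatMap
        (fun i => (PySem.Dict.mk (PySem.List.pyGetD x i [])).keys))
  let sums : PySem.Dict String Int :=
    (PySem.List.pyRange 0 n 1).foldl
      (fun s i =>
        if PySem.List.pyGetD y i "" == label then
          let xi : PySem.Dict String Int := PySem.Dict.mk (PySem.List.pyGetD x i [])
          xi.keys.foldl (fun s w => s.insert w (s.getD w 0 + xi.getD w 0)) s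
        else s)
      PySem.Dict.empty
  vocab.map (fun w => (w, sums.getD w 0))

-- ===== PRECONDITION & SPEC =====
-- Pre_: A indexes x[i] for every i < len(y); with len(y) > len(x) Python raises IndexError.
def Pre_get_corpus_counts (x : List (List (String × Int))) (y : List String) (label : String) : Prop :=
  y.length ≤ x.length
instance (x : List (List (String × Int))) (y : List String) (label : String) : Decidable (Pre_get_corpus_counts x y label) := by unfold Pre_get_corpus_counts; infer_instance
def pvWitness_get_corpus_counts : (List (List (String × Int))) × List String × String :=
  ([[("a", 1), ("b", 2)], [("a", 3)]], ["L", "M"], "L")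

def Spec_get_corpus_counts (x : List (List (String × Int))) (y : List String) (label : String) (out : List (String × Int)) : Prop := out = get_corpus_counts_alt x y label
instance (x : List (List (String × Int))) (y : List String) (label : String) (out : List (String × Int)) : Decidable (Spec_get_corpus_counts x y label out) := by unfold Spec_get_corpus_counts; infer_instance

-- ===== CLAIM (what is proved, stated in full; the proofs are below) =====
def Claim_equal_get_corpus_counts : Prop := ∀ (x : List (List (String × Int))) (y : List String) (label : String), Dom_get_corpus_counts x y label → Pre_get_corpus_counts x y label → Spec_get_corpus_counts x y label (get_corpus_counts x y label)

-- ===== LEMMAS AND PROOFS =====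

-- The invariant tying A's dict d to B's (vocab, sums) pair: d's keys are exactly the vocab V
-- (same order), sums only mentions words of V, and d's items list is V decorated with sums.
def gccInv (d s : PySem.Dict String Int) (V : List String) : Prop :=
  d.keys = V ∧ V.Nodup ∧ (∀ k, s.contains k = true → k ∈ V) ∧
    d.items = V.map (fun w => (w, s.getD w 0))

theorem gccInv_empty : gccInv PySem.Dict.empty PySem.Dict.empty [] := by
  refine ⟨rfl, List.nodup_nil, ?_, rfl⟩
  intro k hk
  simp [PySem.Dict.contains_empty] at hk

-- a matching document: A's per-word branchy update and B's per-word get/insert keep the invariant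
theorem gccInv_match (ws : List String) (g : String → Int) :
    ∀ (d s : PySem.Dict String Int) (V : List String), gccInv d s V →
    gccInv
      (ws.foldl (fun d word =>
        if d.contains word then d.insert word (d.getD word 0 + g word)
        else d.insert word (g word)) d)
      (ws.foldl (fun s w => s.insert w (s.getD w 0 + g w)) s)
      (PySem.Set.update V ws) := by
  induction ws with
  | nil => intro d s V h; simpa [PySem.Set.update_nil] using h
  | cons w ws ih =>
    intro d s V h
    obtain ⟨hk, hnd, hsub, hit⟩ := h
    rw [List.foldl_cons, List.foldl_cons, PySem.Set.update_cons]
    by_cases hc : d.contains w = true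
    · have hwV : w ∈ V := by rw [← hk]; exact (PySem.Dict.contains_iff_mem_keys d w).mp hc
      have hdk : d.keys.Nodup := by rw [hk]; exact hnd
      have hgd : d.getD w 0 = s.getD w 0 := by
        have hmem : (w, s.getD w 0) ∈ d.items := by
          rw [hit]; exact List.mem_map.mpr ⟨w, hwV, rfl⟩
        exact PySem.Dict.getD_of_mem_items d hmem hdk 0
      rw [hc, if_pos rfl, PySem.Set.add_of_mem hwV]
      apply ih
      refine ⟨?_, hnd, ?_, ?_⟩
      · rw [PySem.Dict.keys_insert_of_contains d _ hc, hk]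
      · intro k hk'
        rw [PySem.Dict.contains_insert s] at hk'
        rcases (Bool.or_eq_true _ _).mp hk' with h1 | h1
        · rw [beq_iff_eq] at h1; exact h1 ▸ hwV
        · exact hsub k h1
      · rw [PySem.Dict.items_insert_of_contains d _ hc, hit, List.map_map]
        apply List.map_congr_left
        intro u hu
        by_cases huw : u = w
        · subst huw; simp [hgd, PySem.Dict.getD_insert_self]
        · simp [huw, PySem.Dict.getD_insert_of_ne s _ _ huw, beq_iff_eq]
    · have hc' : d.contains w = false := by simpa using hc
      have hwV : w ∉ V := by
        intro hw
        exact hc ((PySem.Dict.contains_iff_mem_keys d w).mpr (hk ▸ hw))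
      have hsw : s.contains w = false := by
        cases hsw : s.contains w
        · rfl
        · exact absurd (hsub w hsw) hwV
      have hs0 : s.getD w 0 = 0 := PySem.Dict.getD_of_not_contains s 0 hsw
      rw [hc', if_neg (by simp), PySem.Set.add_of_not_mem hwV]
      apply ih
      refine ⟨?_, ?_, ?_, ?_⟩
      · rw [PySem.Dict.keys_insert_of_not_contains d _ hc', hk]
      · exact (PySem.Set.add_of_not_mem hwV) ▸ PySem.Set.nodup_add V w hnd
      · intro k hk'
        rw [PySem.Dict.contains_insert s] at hk'
        rcases (Bool.or_eq_true _ _).mp hk' with h1 | h1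
        · rw [beq_iff_eq] at h1; exact h1 ▸ List.mem_append_right _ (List.mem_singleton.mpr rfl)
        · exact List.mem_append_left _ (hsub k h1)
      · rw [PySem.Dict.items_insert_of_not_contains d _ hc', hit, List.map_append]
        congr 1
        · apply List.map_congr_left
          intro u hu
          have huw : u ≠ w := fun h => hwV (h ▸ hu)
          rw [PySem.Dict.getD_insert_of_ne s _ _ huw]
        · simp [PySem.Dict.getD_insert_self, hs0]

-- a non-matching document: A only seeds unseen words with 0; B's sums are untouched
theorem gccInv_zero (ws : List String) :
    ∀ (d s : PySem.Dict String Int) (V : List String), gccInv d s V →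
    gccInv
      (ws.foldl (fun d word => if !(d.contains word) then d.insert word 0 else d) d)
      s (PySem.Set.update V ws) := by
  induction ws with
  | nil => intro d s V h; simpa [PySem.Set.update_nil] using h
  | cons w ws ih =>
    intro d s V h
    obtain ⟨hk, hnd, hsub, hit⟩ := h
    rw [List.foldl_cons, PySem.Set.update_cons]
    by_cases hc : d.contains w = true
    · have hwV : w ∈ V := by rw [← hk]; exact (PySem.Dict.contains_iff_mem_keys d w).mp hc
      rw [PySem.Set.add_of_mem hwV, if_neg (by simp [hc])]
      exact ih d s V ⟨hk, hnd, hsub, hit⟩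
    · have hc' : d.contains w = false := by simpa using hc
      have hwV : w ∉ V := by
        intro hw
        exact hc ((PySem.Dict.contains_iff_mem_keys d w).mpr (hk ▸ hw))
      have hsw : s.contains w = false := by
        cases hsw : s.contains w
        · rfl
        · exact absurd (hsub w hsw) hwV
      have hs0 : s.getD w 0 = 0 := PySem.Dict.getD_of_not_contains s 0 hsw
      rw [PySem.Set.add_of_not_mem hwV, if_pos (by simp [hc'])]
      apply ih
      refine ⟨?_, ?_, ?_, ?_⟩
      · rw [PySem.Dict.keys_insert_of_not_contains d _ hc', hk]
      · exact (PySem.Set.add_of_not_mem hwV) ▸ PySem.Set.nodup_add V w hnd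
      · intro k hk'
        exact List.mem_append_left _ (hsub k hk')
      · rw [PySem.Dict.items_insert_of_not_contains d _ hc', hit, List.map_append]
        congr 1
        simp [hs0]

-- the outer loop over the (document, label) pairs preserves the invariant
theorem gccInv_main (label : String) (l : List (List (String × Int) × String)) :
    ∀ (d s : PySem.Dict String Int) (V : List String), gccInv d s V →
    gccInv
      (l.foldl (fun d q =>
        let xi : PySem.Dict String Int := PySem.Dict.mk q.1
        if q.2 == label then
          xi.keys.foldl (fun d word =>
            if d.contains word then d.insert word (d.getD word 0 + xi.getD word 0)
            else d.insert word (xi.getD word 0)) d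
        else
          xi.keys.foldl (fun d word => if !(d.contains word) then d.insert word 0 else d) d) d)
      (l.foldl (fun s q =>
        if q.2 == label then
          let xi : PySem.Dict String Int := PySem.Dict.mk q.1
          xi.keys.foldl (fun s w => s.insert w (s.getD w 0 + xi.getD w 0)) s
        else s) s)
      (PySem.Set.update V (l.flatMap (fun q => (PySem.Dict.mk q.1).keys))) := by
  induction l with
  | nil => intro d s V h; simpa [PySem.Set.update_nil] using h
  | cons q l ih =>
    intro d s V h
    rw [List.foldl_cons, List.foldl_cons, List.flatMap_cons, PySem.Set.update_append]
    by_cases hq : q.2 == label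
    · rw [if_pos hq, if_pos hq]
      exact ih _ _ _ (gccInv_match _ _ d s V h)
    · rw [if_neg hq, if_neg hq]
      exact ih _ _ _ (gccInv_zero _ d s V h)

-- ===== VERDICT (by name: the statement is the Claim_ definition above) =====
theorem get_corpus_counts_spec : Claim_equal_get_corpus_counts := by
  intro x y label _ _
  unfold Spec_get_corpus_counts get_corpus_counts get_corpus_counts_alt
  -- both loops are folds over the same list of (document, label) pairs
  have hl := gccInv_main label
    ((PySem.List.pyRange 0 (PySem.List.len y)).map
      (fun i => (PySem.List.pyGetD x i [], PySem.List.pyGetD y i "")))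
    PySem.Dict.empty PySem.Dict.empty [] gccInv_empty
  obtain ⟨-, -, -, hit⟩ := hl
  rw [PySem.List.enumerate_eq_map_pyRange y ""]
  simp only [List.foldl_map, List.flatMap_map, PySem.Set.update_nil_left,
    PySem.List.dedup_eq_ofList] at hit ⊢
  exact hit
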